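-- pv_equiv track=rewrite | github.com/GreatYinYin/nbcc-rag | part4_clauses.py | strip_header
-- ===== SOURCE A (Python) =====
-- def strip_header(lines: list[str]) -> list[str]:
--     """去掉 # 注释头，从 [H1] Part 4 起保留正文。"""
--     out: list[str] = []
--     started = False
--     for ln in lines:
--         if not started:
--             if ln.startswith("[H1]") and "Part 4" in ln:
--                 started = True
--             else:
--                 continue
--         out.append(ln.rstrip("\n"))
--     return out
-- ===== SOURCE B (Python) =====
-- def strip_header(lines: list[str]) -> list[str]:
--     """去掉 # 注释头，从 [H1] Part 4 起保留正文。"""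
--     stripped = []   # rstripped lines, in back-to-front order
--     keep = 0        # watermark: how many of them belong to the body
--     for ln in reversed(lines):
--         stripped.append(ln.rstrip("\n"))
--         if ln.startswith("[H1]") and "Part 4" in ln:
--             keep = len(stripped)
--     body = stripped[:keep]
--     body.reverse()
--     return body
-- ===== Notes on version B (the rewrite author's own statement) =====
-- stated objective: alternative
-- what changed: B traverses the lines backwards in a single pass, accumulating rstripped lines back-to-front and recording a watermark at every marker line; the kept prefix up to the last watermark (= first marker in original order) is reversed at the end, instead of A's forward flagged accumulator loop.
import Mathlib
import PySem

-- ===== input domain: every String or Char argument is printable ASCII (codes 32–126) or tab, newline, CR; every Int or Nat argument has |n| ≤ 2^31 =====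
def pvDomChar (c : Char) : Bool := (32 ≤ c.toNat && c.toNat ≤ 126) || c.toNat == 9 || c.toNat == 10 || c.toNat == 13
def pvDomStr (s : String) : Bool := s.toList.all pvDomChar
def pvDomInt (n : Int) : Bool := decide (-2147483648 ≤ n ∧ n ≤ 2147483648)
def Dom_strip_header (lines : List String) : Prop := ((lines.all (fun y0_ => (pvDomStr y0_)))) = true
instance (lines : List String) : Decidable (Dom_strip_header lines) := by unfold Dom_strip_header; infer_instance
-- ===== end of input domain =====

-- B replaces A's forward flagged loop by a single backwards pass with a watermark, reversing the kept prefix at the end (same cost, different traversal).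


-- shared helpers: ln.rstrip("\n") ported by hand (drop trailing '\n' chars; exact for this single-char chars argument)
def pvRstripNl (s : String) : String := String.ofList ((s.toList.reverse.dropWhile (· == '\n')).reverse)

-- the marker test: ln.startswith("[H1]") and "Part 4" in ln
def pvMarker (ln : String) : Bool := PySem.Str.startswith ln "[H1]" && PySem.Str.isIn "Part 4" ln

-- ===== PORT A =====
def pvStepA (st : List String × Bool) (ln : String) : List String × Bool :=
  if st.2 = false then
    if pvMarker ln then (st.1 ++ [pvRstripNl ln], true) else st
  else (st.1 ++ [pvRstripNl ln], st.2)

def strip_header (lines : List String) : List String :=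
  (lines.foldl pvStepA ([], false)).1

-- ===== PORT B =====
-- backwards pass: append rstripped line; at a marker, set the watermark to the current length
def pvStepB (st : List String × Nat) (ln : String) : List String × Nat :=
  let acc := st.1 ++ [pvRstripNl ln]
  (acc, if pvMarker ln then acc.length else st.2)

def strip_header_alt (lines : List String) : List String :=
  let st := lines.reverse.foldl pvStepB ([], 0)
  (st.1.take st.2).reverse

-- ===== PRECONDITION & SPEC =====
def Spec_strip_header (lines : List String) (out : List String) : Prop := out = strip_header_alt lines
instance (lines : List String) (out : List String) : Decidable (Spec_strip_header lines out) := by unfold Spec_strip_header; infer_instance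

-- ===== CLAIM =====
def Claim_equal_strip_header : Prop := ∀ (lines : List String), Dom_strip_header lines → Spec_strip_header lines (strip_header lines)

-- ===== LEMMAS AND PROOFS =====

-- reference form: the rstripped suffix from the first marker line
def pvSuffix (lines : List String) : List String :=
  match lines.findIdx? pvMarker with
  | none => []
  | some i => (lines.drop i).map pvRstripNl

-- once started, A appends the rstripped tail wholesale
theorem pv_foldl_started (lines : List String) (out : List String) :
    lines.foldl pvStepA (out, true) = (out ++ lines.map pvRstripNl, true) := by
  induction lines generalizing out with
  | nil => simp
  | cons ln ls ih => simp [pvStepA, ih]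

-- before the marker, A's fold computes exactly the reference suffix appended to the accumulator
theorem pv_foldl_main (lines : List String) (out : List String) :
    (lines.foldl pvStepA (out, false)).1 = out ++ pvSuffix lines := by
  induction lines generalizing out with
  | nil => simp [pvSuffix]
  | cons ln ls ih =>
    by_cases h : pvMarker ln = true
    · simp [pvStepA, h, pv_foldl_started, pvSuffix, List.findIdx?_cons]
    · have hb : pvMarker ln = false := by simpa using h
      have halt : pvSuffix (ln :: ls) = pvSuffix ls := by
        simp only [pvSuffix, List.findIdx?_cons, hb]
        cases ls.findIdx? pvMarker with
        | none => simp
        | some i => simp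
      simp [pvStepA, hb, ih, halt]

-- B's backwards fold: accumulator is the back-to-front map; watermark encodes the first marker index
theorem pv_foldl_B (lines : List String) (acc0 : List String) (k0 : Nat) :
    lines.reverse.foldl pvStepB (acc0, k0) =
      (acc0 ++ (lines.reverse).map pvRstripNl,
       match lines.findIdx? pvMarker with
       | some i => acc0.length + (lines.length - i)
       | none => k0) := by
  induction lines generalizing acc0 k0 with
  | nil => simp
  | cons ln ls ih =>
    have hlen : ∀ i, ls.findIdx? pvMarker = some i → i < ls.length := by
      intro i hi
      exact List.findIdx?_eq_some_iff_findIdx_eq.mp hi |>.1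
    simp only [List.reverse_cons, List.foldl_append, ih, List.foldl_cons, List.foldl_nil,
      pvStepB, List.findIdx?_cons, List.map_append, List.map_cons, List.map_nil]
    by_cases h : pvMarker ln = true
    · simp only [h, if_true, List.length_append, List.length_cons, List.length_nil]
      cases hls : ls.findIdx? pvMarker with
      | none =>
        simp [List.append_assoc]
        exact Nat.add_assoc _ _ _
      | some i =>
        have := hlen i hls
        simp [List.append_assoc, Prod.mk.injEq]
        exact Nat.add_assoc _ _ _
    · have hb : pvMarker ln = false := by simpa using h
      simp only [hb, Bool.false_eq_true, if_false, List.append_assoc]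
      cases hls : ls.findIdx? pvMarker with
      | none => simp
      | some i =>
        have := hlen i hls
        simp [List.length_cons]

-- B equals the reference suffix
theorem pv_alt_eq_suffix (lines : List String) : strip_header_alt lines = pvSuffix lines := by
  unfold strip_header_alt pvSuffix
  rw [pv_foldl_B]
  cases hls : lines.findIdx? pvMarker with
  | none => simp
  | some i =>
    have hi : i < lines.length := List.findIdx?_eq_some_iff_findIdx_eq.mp hls |>.1
    simp only [List.nil_append, List.map_reverse]
    rw [List.take_reverse, List.reverse_reverse, List.map_drop]
    have hx : (lines.map pvRstripNl).length - (List.length ([] : List String) + (lines.length - i)) = i := by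
      simp only [List.length_map, List.length_nil]; omega
    rw [hx]

-- ===== VERDICT =====
theorem strip_header_spec : Claim_equal_strip_header := by
  intro lines _
  unfold Spec_strip_header strip_header
  rw [pv_alt_eq_suffix]
  simpa using pv_foldl_main lines []
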